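-- pv_equiv track=rewrite | github.com/RickFreemanCui/jsntlib | Archive Collection/NTLArchive/NTLChineseRemainderTheorem.py | iterCalc
-- ===== SOURCE A (Python) =====
-- def iterCalc(ognList, coeList, modulo):
--     ptrList = []                            #寄存指向每一數組層的號
--     lvlList = []                            #寄存每一數組層的最大號
--     for tmpList in ognList:
--         ptrList.append(len(tmpList)-1)
--         lvlList.append(len(tmpList)-1)
--
--     flag = 1
--     rstList = []
--
--     while flag:
--         ptrNum = 0
--         rstNum = 0
--         for ptr in ptrList:
--             rstNum += ognList[ptrNum][ptr] * coeList[ptrNum]    #計算結果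
--             ptrNum += 1
--
--         rstList.append(rstNum % modulo)
--         (ptrList, flag) = updateState(ptrList, lvlList)         #更新ptrList的寄存值，並返回是否結束循環
--
--     return rstList
--
-- def updateState(ptrList, lvlList):
--     ptr = 0
--     flag = 1
--     glbFlag = 1
--
--     while flag:                                 #未更新寄存數值前，保持循環（類似同步計數器）
--         if ptrList[ptr] > 0:                    #該層未遍歷，更新該層，終止循環
--             ptrList[ptr] -= 1
--             flag = 0
--         else:                                   #該層已遍歷
--             if ptr < len(lvlList) - 1:          #更新指針至下一層並接著循環
--                 ptrList[ptr] = lvlList[ptr]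
--                 ptr += 1
--             else:                               #所有情況均已遍歷，終止循環
--                 flag = 0
--                 glbFlag = 0
--
--     return ptrList, glbFlag
-- ===== SOURCE B (Python) =====
-- def iterCalc(ognList, coeList, modulo):
--     def sums(i):
--         if i == len(ognList):
--             return [0]
--         rest = sums(i + 1)
--         c = coeList[i]
--         return [c * x + r for r in rest for x in reversed(ognList[i])]
--     return [s % modulo for s in sums(0)]
-- ===== Notes on version B (the rewrite author's own statement) =====
-- stated objective: alternative
-- what changed: Replaces A's odometer loop, which steps a pointer counter and recomputes the full n-term dot product for every combination, by a recursion over the layers that builds the result by extending each partial tail sum per element of the next layer.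
import Mathlib
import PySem

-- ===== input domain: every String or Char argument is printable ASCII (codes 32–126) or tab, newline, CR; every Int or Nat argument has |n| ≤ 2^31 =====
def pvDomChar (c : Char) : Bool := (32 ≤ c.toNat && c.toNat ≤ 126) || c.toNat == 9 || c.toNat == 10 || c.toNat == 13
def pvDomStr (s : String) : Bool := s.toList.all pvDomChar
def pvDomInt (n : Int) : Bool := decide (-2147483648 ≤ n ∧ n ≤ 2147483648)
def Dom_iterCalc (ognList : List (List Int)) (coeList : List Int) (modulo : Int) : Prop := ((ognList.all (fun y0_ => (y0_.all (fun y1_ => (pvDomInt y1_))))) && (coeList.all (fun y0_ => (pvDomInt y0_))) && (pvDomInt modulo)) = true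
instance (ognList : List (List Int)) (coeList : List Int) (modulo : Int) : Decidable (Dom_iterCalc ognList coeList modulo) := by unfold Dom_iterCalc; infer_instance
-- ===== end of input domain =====

-- B replaces A's odometer loop (which recomputes the whole dot product at every combination and
-- steps a pointer counter) by a recursion over the layers that extends each partial tail sum,
-- producing the same output list by a different algorithm.

-- ===== PORT A =====
-- inner 'for ptr in ptrList: rstNum += ognList[ptrNum][ptr] * coeList[ptrNum]' as parallel recursion
-- (ptrList drives the loop; exhausting ognList/coeList first would raise in Python — excluded by Pre_;
--  the out-of-range index raise of ognList[ptrNum][ptr] is totalized with pyGetD, exact under Pre_)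
def dotA : List (List Int) → List Int → List Int → Int
  | _, _, [] => 0
  | l :: ls, c :: cs, p :: ps => PySem.List.pyGetD l p 0 * c + dotA ls cs ps
  | _, _, _ :: _ => 0

-- updateState's inner while, recursing over the suffixes at position ptr; the call site always
-- passes two lists of equal length, where Python's 'ptr < len(lvlList) - 1' is 'lvs ≠ []'
def updateStateGo : List Int → List Int → List Int × Int
  | p :: ps, lv :: lvs =>
      if p > 0 then ((p - 1) :: ps, 1)
      else
        match ps, lvs with
        | q :: qs, w :: ws =>
            let r := updateStateGo (q :: qs) (w :: ws)
            (lv :: r.1, r.2)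
        | _, _ => (p :: ps, 0)
  | ps, _ => (ps, 0)   -- Python raises IndexError here; unreachable under Pre_

-- the main 'while flag' loop; fuel bounds the iteration count (exactly ∏ lengths under Pre_, proved below)
def iterLoopA (ogn : List (List Int)) (coe : List Int) (modulo : Int) (lvl : List Int) :
    Nat → List Int → List Int
  | 0, _ => []
  | fuel + 1, ptrs =>
      let r := PySem.Int.mod (dotA ogn coe ptrs) modulo
      let u := updateStateGo ptrs lvl
      if u.2 ≠ 0 then r :: iterLoopA ogn coe modulo lvl fuel u.1
      else [r]

def iterCalc (ognList : List (List Int)) (coeList : List Int) (modulo : Int) : List Int :=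
  let ptrList := ognList.map (fun t => ((t.length : Int) - 1))
  let lvlList := ognList.map (fun t => ((t.length : Int) - 1))
  iterLoopA ognList coeList modulo lvlList ((ognList.map List.length).prod) ptrList

-- ===== PORT B =====
-- sums(i), recursing over the layer list and its coefficients in parallel
def sumsB : List (List Int) → List Int → List Int
  | [], _ => [0]
  | l :: ls, c :: cs =>
      let rest := sumsB ls cs
      rest.flatMap (fun r => l.reverse.map (fun x => c * x + r))
  | _ :: _, [] => []   -- Python raises IndexError (coeList too short); unreachable under Pre_

def iterCalc_alt (ognList : List (List Int)) (coeList : List Int) (modulo : Int) : List Int :=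
  (sumsB ognList coeList).map (fun s => PySem.Int.mod s modulo)

-- ===== PRECONDITION & SPEC =====
-- exactly the inputs on which Python A returns: modulo ≠ 0 (ZeroDivisionError), a nonempty list of
-- nonempty layers (IndexError otherwise) and enough coefficients (IndexError otherwise)
def Pre_iterCalc (ognList : List (List Int)) (coeList : List Int) (modulo : Int) : Prop :=
  modulo ≠ 0 ∧ ognList ≠ [] ∧ (∀ l ∈ ognList, l ≠ []) ∧ ognList.length ≤ coeList.length

instance (ognList : List (List Int)) (coeList : List Int) (modulo : Int) : Decidable (Pre_iterCalc ognList coeList modulo) := by unfold Pre_iterCalc; infer_instance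

def pvWitness_iterCalc : List (List Int) × List Int × Int := ([[1, 2], [3]], [5, 7], 4)

def Spec_iterCalc (ognList : List (List Int)) (coeList : List Int) (modulo : Int) (out : List Int) : Prop := out = iterCalc_alt ognList coeList modulo
instance (ognList : List (List Int)) (coeList : List Int) (modulo : Int) (out : List Int) : Decidable (Spec_iterCalc ognList coeList modulo out) := by unfold Spec_iterCalc; infer_instance

-- ===== CLAIM (what is proved, stated in full; the proofs are below) =====
def Claim_equal_iterCalc : Prop := ∀ (ognList : List (List Int)) (coeList : List Int) (modulo : Int), Dom_iterCalc ognList coeList modulo → Pre_iterCalc ognList coeList modulo → Spec_iterCalc ognList coeList modulo (iterCalc ognList coeList modulo)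

-- ===== LEMMAS AND PROOFS =====

-- the lvlList both Python functions share
def pvLvl (ogn : List (List Int)) : List Int := ogn.map (fun t => ((t.length : Int) - 1))

-- one countdown block of outputs: indices j, j-1, …, 0 of layer l, on top of a fixed tail sum r
def blockT (l : List Int) (c : Int) (j : Int) (r : Int) : List Int :=
  ((List.range (j.toNat + 1)).reverse).map (fun i => c * l.getD i 0 + r)

-- the sequence of dot products A's loop still has to emit from pointer state q
def Tlist : List (List Int) → List Int → List Int → List Int
  | [], _, _ => [0]
  | l :: ls, c :: cs, j :: q =>
      match Tlist ls cs q with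
      | [] => []
      | r :: rs =>
          blockT l c j r ++ rs.flatMap (fun r' => blockT l c ((l.length : Int) - 1) r')
  | _, _, _ => []

-- valid pointer states of A's odometer
def ValidP (ogn : List (List Int)) (q : List Int) : Prop :=
  List.Forall₂ (fun (l : List Int) (j : Int) => 0 ≤ j ∧ j < (l.length : Int)) ogn q

lemma pvLvl_cons (l : List Int) (ls : List (List Int)) :
    pvLvl (l :: ls) = ((l.length : Int) - 1) :: pvLvl ls := rfl

lemma pyGetD_eq_getD_toNat (l : List Int) (j : Int) (h0 : 0 ≤ j) (h1 : j < (l.length : Int)) :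
    PySem.List.pyGetD l j 0 = l.getD j.toNat 0 := by
  rw [PySem.List.pyGetD_eq_getElem l 0 h0 h1, List.getD_eq_getElem l 0 (by omega)]

lemma blockT_pos (l : List Int) (c r : Int) (j : Int) (hj : 0 < j) :
    blockT l c j r = (c * l.getD j.toNat 0 + r) :: blockT l c (j - 1) r := by
  have h : j.toNat = (j - 1).toNat + 1 := by omega
  rw [blockT, blockT, h, List.range_succ]
  simp

lemma blockT_zero (l : List Int) (c r : Int) :
    blockT l c 0 r = [c * l.getD 0 0 + r] := by
  simp [blockT]

lemma step_lemma (ogn : List (List Int)) : ∀ (coe q : List Int),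
    ValidP ogn q → ogn.length ≤ coe.length →
    (Tlist ogn coe q =
        dotA ogn coe q ::
          (if (updateStateGo q (pvLvl ogn)).2 ≠ 0 then Tlist ogn coe (updateStateGo q (pvLvl ogn)).1 else [])) ∧
    ((updateStateGo q (pvLvl ogn)).2 ≠ 0 → ValidP ogn (updateStateGo q (pvLvl ogn)).1) := by
  induction ogn with
  | nil =>
      intro coe q hv _
      cases hv
      simp [Tlist, dotA, updateStateGo]
  | cons l ls ih =>
      intro coe q hv hc
      cases hv with
      | cons hj hv' =>
        rename_i j qs
        cases coe with
        | nil => simp at hc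
        | cons c cs =>
          have hc' : ls.length ≤ cs.length := by simpa using hc
          obtain ⟨ht, hval⟩ := ih cs qs hv' hc'
          have hdot : dotA (l :: ls) (c :: cs) (j :: qs) =
              c * l.getD j.toNat 0 + dotA ls cs qs := by
            rw [dotA, pyGetD_eq_getD_toNat l j hj.1 hj.2]; ring
          by_cases hjp : 0 < j
          · -- head pointer decrements
            have hupd : updateStateGo (j :: qs) (pvLvl (l :: ls)) = ((j - 1) :: qs, 1) := by
              rw [pvLvl_cons, updateStateGo.eq_def]
              simp [hjp]
            rw [hupd]
            refine ⟨?_, fun _ => List.Forall₂.cons ⟨by omega, by omega⟩ hv'⟩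
            simp only [Tlist, ht]
            rw [blockT_pos l c (dotA ls cs qs) j hjp, hdot]
            simp
          · have hj0 : j = 0 := by omega
            subst hj0
            cases hv' with
            | nil =>
                -- single layer, pointer exhausted: loop stops
                cases cs <;>
                  simp [Tlist, updateStateGo, pvLvl, blockT_zero, dotA,
                    PySem.List.pyGetD_zero, List.getD, mul_comm]
            | cons hj2 hv2 =>
                rename_i l2 j2 ls2 qs2
                simp only [pvLvl_cons] at ht hval ⊢
                have hupd : updateStateGo (0 :: j2 :: qs2)
                    (((l.length : Int) - 1) :: ((l2.length : Int) - 1) :: pvLvl ls2) =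
                    (((l.length : Int) - 1) ::
                      (updateStateGo (j2 :: qs2) (((l2.length : Int) - 1) :: pvLvl ls2)).1,
                     (updateStateGo (j2 :: qs2) (((l2.length : Int) - 1) :: pvLvl ls2)).2) := by
                  rw [updateStateGo.eq_def]
                  simp
                rw [hupd]
                set u' := updateStateGo (j2 :: qs2) (((l2.length : Int) - 1) :: pvLvl ls2) with hu'
                by_cases hu : u'.2 ≠ 0
                · have hv3 : ValidP (l2 :: ls2) u'.1 := hval hu
                  obtain ⟨ht2, _⟩ := ih cs u'.1 hv3 hc'
                  simp only [pvLvl_cons] at ht2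
                  refine ⟨?_, fun _ => List.Forall₂.cons ⟨by omega, by omega⟩ hv3⟩
                  simp only [hu, if_pos, ne_eq, not_false_iff]
                  simp only [Tlist, ht, ht2, hu, if_pos, ne_eq, not_false_iff]
                  rw [blockT_zero, hdot]
                  simp [List.getD]
                · refine ⟨?_, fun h => absurd h hu⟩
                  simp only [ne_eq, not_not] at hu
                  simp only [hu, ne_eq, not_true_eq_false, if_false]
                  simp only [Tlist, ht, hu, ne_eq, not_true_eq_false, if_false]
                  rw [blockT_zero, hdot]
                  simp [List.getD]

lemma run_lemma (ogn : List (List Int)) (coe : List Int) (m : Int) :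
    ∀ (fuel : Nat) (q : List Int), ValidP ogn q → ogn.length ≤ coe.length →
      (Tlist ogn coe q).length ≤ fuel →
      iterLoopA ogn coe m (pvLvl ogn) fuel q =
        (Tlist ogn coe q).map (fun s => PySem.Int.mod s m) := by
  intro fuel
  induction fuel with
  | zero =>
      intro q hv hc hlen
      obtain ⟨ht, _⟩ := step_lemma ogn coe q hv hc
      rw [ht] at hlen; simp at hlen
  | succ f ihf =>
      intro q hv hc hlen
      obtain ⟨ht, hval⟩ := step_lemma ogn coe q hv hc
      by_cases hu : (updateStateGo q (pvLvl ogn)).2 ≠ 0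
      · rw [iterLoopA]
        simp only [hu, if_pos, ne_eq, not_false_iff]
        rw [ht]
        simp only [hu, if_pos, ne_eq, not_false_iff, List.map_cons]
        have hlen' : (Tlist ogn coe (updateStateGo q (pvLvl ogn)).1).length ≤ f := by
          rw [ht] at hlen; simp [hu] at hlen; omega
        rw [ihf _ (hval hu) hc hlen']
      · simp only [ne_eq, not_not] at hu
        rw [iterLoopA]
        simp only [hu, ne_eq, not_true_eq_false, if_false]
        rw [ht]
        simp [hu]

lemma sumsB_ne_nil (ogn : List (List Int)) : ∀ coe : List Int,
    (∀ l ∈ ogn, l ≠ []) → ogn.length ≤ coe.length → sumsB ogn coe ≠ [] := by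
  induction ogn with
  | nil => intro coe _ _; simp [sumsB]
  | cons l ls ih =>
      intro coe hne hc
      cases coe with
      | nil => simp at hc
      | cons c cs =>
        have h1 : sumsB ls cs ≠ [] := ih cs (fun x hx => hne x (by simp [hx])) (by simpa using hc)
        have h2 : l ≠ [] := hne l (by simp)
        simp only [sumsB, ne_eq, List.flatMap_eq_nil_iff]
        intro h
        obtain ⟨r, hr⟩ := List.exists_mem_of_ne_nil _ h1
        have := h _ hr
        simp at this
        exact h2 this

lemma blockT_full (l : List Int) (c r : Int) (h : l ≠ []) :
    blockT l c ((l.length : Int) - 1) r = l.reverse.map (fun x => c * x + r) := by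
  have hlen : (((l.length : Int) - 1)).toNat + 1 = l.length := by
    cases l with
    | nil => simp at h
    | cons a as => simp
  unfold blockT
  rw [hlen, List.map_reverse, List.map_reverse]
  congr 1
  apply List.ext_getElem
  · simp
  · intro i h1 h2
    simp only [List.getElem_map, List.getElem_range]
    rw [List.getD_eq_getElem l 0 (by simpa using h1)]

lemma T_max (ogn : List (List Int)) : ∀ coe : List Int,
    (∀ l ∈ ogn, l ≠ []) → ogn.length ≤ coe.length →
    Tlist ogn coe (pvLvl ogn) = sumsB ogn coe := by
  induction ogn with
  | nil => intro coe _ _; simp [Tlist, sumsB]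
  | cons l ls ih =>
      intro coe hne hc
      cases coe with
      | nil => simp at hc
      | cons c cs =>
        have hne' : ∀ x ∈ ls, x ≠ [] := fun x hx => hne x (by simp [hx])
        have hc' : ls.length ≤ cs.length := by simpa using hc
        have hrec := ih cs hne' hc'
        have hnn := sumsB_ne_nil ls cs hne' hc'
        obtain ⟨r, rs, hrs⟩ := List.exists_cons_of_ne_nil hnn
        have hl : l ≠ [] := hne l (by simp)
        have hfun : (fun r' => blockT l c ((l.length : Int) - 1) r') =
            (fun r' => l.reverse.map (fun x => c * x + r')) :=
          funext fun r' => blockT_full l c r' hl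
        show Tlist (l :: ls) (c :: cs) (((l.length : Int) - 1) :: pvLvl ls) = _
        simp only [Tlist, hrec, hrs, sumsB, List.flatMap_cons]
        rw [blockT_full l c r hl, hfun]

lemma sumsB_length (ogn : List (List Int)) : ∀ coe : List Int,
    ogn.length ≤ coe.length →
    (sumsB ogn coe).length = (ogn.map List.length).prod := by
  induction ogn with
  | nil => intro coe _; simp [sumsB]
  | cons l ls ih =>
      intro coe hc
      cases coe with
      | nil => simp at hc
      | cons c cs =>
        have hc' : ls.length ≤ cs.length := by simpa using hc
        simp [sumsB, List.length_flatMap, ih cs hc', List.map_const',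
          List.sum_replicate, Nat.mul_comm]

lemma valid_max (ogn : List (List Int)) (hne : ∀ l ∈ ogn, l ≠ []) :
    ValidP ogn (pvLvl ogn) := by
  unfold ValidP pvLvl
  rw [List.forall₂_map_right_iff]
  rw [List.forall₂_same]
  intro l hl
  have : l ≠ [] := hne l hl
  have : 0 < l.length := List.length_pos_of_ne_nil this
  omega

-- ===== VERDICT (by name: the statement is the Claim_ definition above) =====
theorem iterCalc_spec : Claim_equal_iterCalc := by
  intro ogn coe m _ hp
  obtain ⟨hm, hne0, hne, hc⟩ := hp
  unfold Spec_iterCalc iterCalc iterCalc_alt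
  have hv := valid_max ogn hne
  have hT := T_max ogn coe hne hc
  have hlen : (Tlist ogn coe (pvLvl ogn)).length ≤ (ogn.map List.length).prod := by
    rw [hT, sumsB_length ogn coe hc]
  show iterLoopA ogn coe m (pvLvl ogn) ((ogn.map List.length).prod) (pvLvl ogn) = _
  rw [run_lemma ogn coe m _ _ hv hc hlen, hT]
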